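-- pv_equiv track=rewrite | github.com/bingshang04/edge_ids | src/utils/helpers.py | parse_packet_flags
-- ===== SOURCE A (Python) =====
-- def parse_packet_flags(flags_str: str) -> dict:
--     """
--     解析TCP标志位字符串
--
--     Args:
--         flags_str: 标志位字符串（如 'SA'）
--
--     Returns:
--         标志位字典
--     """
--     flag_map = {
--         'F': 'fin',
--         'S': 'syn',
--         'R': 'rst',
--         'P': 'psh',
--         'A': 'ack',
--         'U': 'urg',
--         'E': 'ece',
--         'C': 'cwr'
--     }
--
--     result = {name: False for name in flag_map.values()}
--
--     for char in flags_str: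
--         if char in flag_map:
--             result[flag_map[char]] = True
--
--     return result
-- ===== SOURCE B (Python) =====
-- def parse_packet_flags(flags_str: str) -> dict:
--     """Build the flag dict directly: one membership test per flag, no table, no loop."""
--     return {
--         'fin': 'F' in flags_str,
--         'syn': 'S' in flags_str,
--         'rst': 'R' in flags_str,
--         'psh': 'P' in flags_str,
--         'ack': 'A' in flags_str,
--         'urg': 'U' in flags_str,
--         'ece': 'E' in flags_str,
--         'cwr': 'C' in flags_str,
--     }
-- ===== Notes on version B (the rewrite author's own statement) =====
-- stated objective: simpler
-- what changed: B drops the char-to-name table, the all-False initialisation and the scan-the-input loop with its conditional, and builds the result dict directly with one membership test of each flag character in the input string.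
import Mathlib
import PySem

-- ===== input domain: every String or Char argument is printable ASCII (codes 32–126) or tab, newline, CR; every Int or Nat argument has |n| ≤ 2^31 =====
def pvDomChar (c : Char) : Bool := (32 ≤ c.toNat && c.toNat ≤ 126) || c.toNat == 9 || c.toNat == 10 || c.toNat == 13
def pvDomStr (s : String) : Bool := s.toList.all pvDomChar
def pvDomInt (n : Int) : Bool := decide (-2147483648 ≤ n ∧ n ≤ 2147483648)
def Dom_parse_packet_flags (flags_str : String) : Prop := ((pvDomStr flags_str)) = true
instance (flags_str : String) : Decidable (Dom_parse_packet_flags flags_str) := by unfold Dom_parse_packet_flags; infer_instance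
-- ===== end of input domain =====

-- B drops A's char->name table, the all-False initialisation and the scan-the-input loop,
-- and builds the result dict directly with one membership test per flag name (objective: simpler).

-- ===== PORT A =====
def pvFlagMapA : PySem.Dict Char String :=
  PySem.Dict.ofList [('F', "fin"), ('S', "syn"), ('R', "rst"), ('P', "psh"),
                     ('A', "ack"), ('U', "urg"), ('E', "ece"), ('C', "cwr")]

def parse_packet_flags (flags_str : String) : List (String × Bool) :=
  let result0 : PySem.Dict String Bool :=
    pvFlagMapA.values.foldl (fun d name => d.insert name false) PySem.Dict.empty
  let result := flags_str.toList.foldl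
    (fun r c => if pvFlagMapA.contains c then r.insert (pvFlagMapA.getD c "") true else r)
    result0
  result.items

-- ===== PORT B =====
-- Python's `'F' in flags_str` with a one-char needle is exactly char membership in the string.
def parse_packet_flags_alt (flags_str : String) : List (String × Bool) :=
  [("fin", flags_str.toList.contains 'F'),
   ("syn", flags_str.toList.contains 'S'),
   ("rst", flags_str.toList.contains 'R'),
   ("psh", flags_str.toList.contains 'P'),
   ("ack", flags_str.toList.contains 'A'),
   ("urg", flags_str.toList.contains 'U'),
   ("ece", flags_str.toList.contains 'E'),
   ("cwr", flags_str.toList.contains 'C')]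

-- ===== PRECONDITION & SPEC =====
def Spec_parse_packet_flags (flags_str : String) (out : List (String × Bool)) : Prop := out = parse_packet_flags_alt flags_str
instance (flags_str : String) (out : List (String × Bool)) : Decidable (Spec_parse_packet_flags flags_str out) := by unfold Spec_parse_packet_flags; infer_instance

-- ===== CLAIM (what is proved, stated in full; the proofs are below) =====
def Claim_equal_parse_packet_flags : Prop := ∀ (flags_str : String), Dom_parse_packet_flags flags_str → Spec_parse_packet_flags flags_str (parse_packet_flags flags_str)

-- ===== LEMMAS AND PROOFS =====

lemma pvLoopA_inv (cs : List Char) (b1 b2 b3 b4 b5 b6 b7 b8 : Bool) :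
    cs.foldl
      (fun r c => if pvFlagMapA.contains c then r.insert (pvFlagMapA.getD c "") true else r)
      (PySem.Dict.mk [("fin", b1), ("syn", b2), ("rst", b3), ("psh", b4), ("ack", b5), ("urg", b6), ("ece", b7), ("cwr", b8)])
    = PySem.Dict.mk [("fin", b1 || cs.contains 'F'), ("syn", b2 || cs.contains 'S'), ("rst", b3 || cs.contains 'R'), ("psh", b4 || cs.contains 'P'), ("ack", b5 || cs.contains 'A'), ("urg", b6 || cs.contains 'U'), ("ece", b7 || cs.contains 'E'), ("cwr", b8 || cs.contains 'C')] := by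
  induction cs generalizing b1 b2 b3 b4 b5 b6 b7 b8 with
  | nil => simp
  | cons c cs ih =>
    by_cases hF : c = 'F'
    · subst hF
      have hins : (PySem.Dict.mk [("fin", b1), ("syn", b2), ("rst", b3), ("psh", b4), ("ack", b5), ("urg", b6), ("ece", b7), ("cwr", b8)]).insert "fin" true = PySem.Dict.mk [("fin", true), ("syn", b2), ("rst", b3), ("psh", b4), ("ack", b5), ("urg", b6), ("ece", b7), ("cwr", b8)] := by
        apply PySem.Dict.ext; simp [PySem.Dict.items_insert]
      rw [List.foldl_cons]
      have hstep : (if pvFlagMapA.contains 'F' = true then (PySem.Dict.mk [("fin", b1), ("syn", b2), ("rst", b3), ("psh", b4), ("ack", b5), ("urg", b6), ("ece", b7), ("cwr", b8)]).insert (pvFlagMapA.getD 'F' "") true else PySem.Dict.mk [("fin", b1), ("syn", b2), ("rst", b3), ("psh", b4), ("ack", b5), ("urg", b6), ("ece", b7), ("cwr", b8)]) = PySem.Dict.mk [("fin", true), ("syn", b2), ("rst", b3), ("psh", b4), ("ack", b5), ("urg", b6), ("ece", b7), ("cwr", b8)] := by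
        rw [if_pos (by decide)]; rw [show pvFlagMapA.getD 'F' "" = "fin" from by decide]; exact hins
      rw [hstep, ih]
      simp
    ·
      by_cases hS : c = 'S'
      · subst hS
        have hins : (PySem.Dict.mk [("fin", b1), ("syn", b2), ("rst", b3), ("psh", b4), ("ack", b5), ("urg", b6), ("ece", b7), ("cwr", b8)]).insert "syn" true = PySem.Dict.mk [("fin", b1), ("syn", true), ("rst", b3), ("psh", b4), ("ack", b5), ("urg", b6), ("ece", b7), ("cwr", b8)] := by
          apply PySem.Dict.ext; simp [PySem.Dict.items_insert]
        rw [List.foldl_cons]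
        have hstep : (if pvFlagMapA.contains 'S' = true then (PySem.Dict.mk [("fin", b1), ("syn", b2), ("rst", b3), ("psh", b4), ("ack", b5), ("urg", b6), ("ece", b7), ("cwr", b8)]).insert (pvFlagMapA.getD 'S' "") true else PySem.Dict.mk [("fin", b1), ("syn", b2), ("rst", b3), ("psh", b4), ("ack", b5), ("urg", b6), ("ece", b7), ("cwr", b8)]) = PySem.Dict.mk [("fin", b1), ("syn", true), ("rst", b3), ("psh", b4), ("ack", b5), ("urg", b6), ("ece", b7), ("cwr", b8)] := by
          rw [if_pos (by decide)]; rw [show pvFlagMapA.getD 'S' "" = "syn" from by decide]; exact hins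
        rw [hstep, ih]
        simp
      ·
        by_cases hR : c = 'R'
        · subst hR
          have hins : (PySem.Dict.mk [("fin", b1), ("syn", b2), ("rst", b3), ("psh", b4), ("ack", b5), ("urg", b6), ("ece", b7), ("cwr", b8)]).insert "rst" true = PySem.Dict.mk [("fin", b1), ("syn", b2), ("rst", true), ("psh", b4), ("ack", b5), ("urg", b6), ("ece", b7), ("cwr", b8)] := by
            apply PySem.Dict.ext; simp [PySem.Dict.items_insert]
          rw [List.foldl_cons]
          have hstep : (if pvFlagMapA.contains 'R' = true then (PySem.Dict.mk [("fin", b1), ("syn", b2), ("rst", b3), ("psh", b4), ("ack", b5), ("urg", b6), ("ece", b7), ("cwr", b8)]).insert (pvFlagMapA.getD 'R' "") true else PySem.Dict.mk [("fin", b1), ("syn", b2), ("rst", b3), ("psh", b4), ("ack", b5), ("urg", b6), ("ece", b7), ("cwr", b8)]) = PySem.Dict.mk [("fin", b1), ("syn", b2), ("rst", true), ("psh", b4), ("ack", b5), ("urg", b6), ("ece", b7), ("cwr", b8)] := by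
            rw [if_pos (by decide)]; rw [show pvFlagMapA.getD 'R' "" = "rst" from by decide]; exact hins
          rw [hstep, ih]
          simp
        ·
          by_cases hP : c = 'P'
          · subst hP
            have hins : (PySem.Dict.mk [("fin", b1), ("syn", b2), ("rst", b3), ("psh", b4), ("ack", b5), ("urg", b6), ("ece", b7), ("cwr", b8)]).insert "psh" true = PySem.Dict.mk [("fin", b1), ("syn", b2), ("rst", b3), ("psh", true), ("ack", b5), ("urg", b6), ("ece", b7), ("cwr", b8)] := by
              apply PySem.Dict.ext; simp [PySem.Dict.items_insert]
            rw [List.foldl_cons]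
            have hstep : (if pvFlagMapA.contains 'P' = true then (PySem.Dict.mk [("fin", b1), ("syn", b2), ("rst", b3), ("psh", b4), ("ack", b5), ("urg", b6), ("ece", b7), ("cwr", b8)]).insert (pvFlagMapA.getD 'P' "") true else PySem.Dict.mk [("fin", b1), ("syn", b2), ("rst", b3), ("psh", b4), ("ack", b5), ("urg", b6), ("ece", b7), ("cwr", b8)]) = PySem.Dict.mk [("fin", b1), ("syn", b2), ("rst", b3), ("psh", true), ("ack", b5), ("urg", b6), ("ece", b7), ("cwr", b8)] := by
              rw [if_pos (by decide)]; rw [show pvFlagMapA.getD 'P' "" = "psh" from by decide]; exact hins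
            rw [hstep, ih]
            simp
          ·
            by_cases hA : c = 'A'
            · subst hA
              have hins : (PySem.Dict.mk [("fin", b1), ("syn", b2), ("rst", b3), ("psh", b4), ("ack", b5), ("urg", b6), ("ece", b7), ("cwr", b8)]).insert "ack" true = PySem.Dict.mk [("fin", b1), ("syn", b2), ("rst", b3), ("psh", b4), ("ack", true), ("urg", b6), ("ece", b7), ("cwr", b8)] := by
                apply PySem.Dict.ext; simp [PySem.Dict.items_insert]
              rw [List.foldl_cons]
              have hstep : (if pvFlagMapA.contains 'A' = true then (PySem.Dict.mk [("fin", b1), ("syn", b2), ("rst", b3), ("psh", b4), ("ack", b5), ("urg", b6), ("ece", b7), ("cwr", b8)]).insert (pvFlagMapA.getD 'A' "") true else PySem.Dict.mk [("fin", b1), ("syn", b2), ("rst", b3), ("psh", b4), ("ack", b5), ("urg", b6), ("ece", b7), ("cwr", b8)]) = PySem.Dict.mk [("fin", b1), ("syn", b2), ("rst", b3), ("psh", b4), ("ack", true), ("urg", b6), ("ece", b7), ("cwr", b8)] := by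
                rw [if_pos (by decide)]; rw [show pvFlagMapA.getD 'A' "" = "ack" from by decide]; exact hins
              rw [hstep, ih]
              simp
            ·
              by_cases hU : c = 'U'
              · subst hU
                have hins : (PySem.Dict.mk [("fin", b1), ("syn", b2), ("rst", b3), ("psh", b4), ("ack", b5), ("urg", b6), ("ece", b7), ("cwr", b8)]).insert "urg" true = PySem.Dict.mk [("fin", b1), ("syn", b2), ("rst", b3), ("psh", b4), ("ack", b5), ("urg", true), ("ece", b7), ("cwr", b8)] := by
                  apply PySem.Dict.ext; simp [PySem.Dict.items_insert]
                rw [List.foldl_cons]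
                have hstep : (if pvFlagMapA.contains 'U' = true then (PySem.Dict.mk [("fin", b1), ("syn", b2), ("rst", b3), ("psh", b4), ("ack", b5), ("urg", b6), ("ece", b7), ("cwr", b8)]).insert (pvFlagMapA.getD 'U' "") true else PySem.Dict.mk [("fin", b1), ("syn", b2), ("rst", b3), ("psh", b4), ("ack", b5), ("urg", b6), ("ece", b7), ("cwr", b8)]) = PySem.Dict.mk [("fin", b1), ("syn", b2), ("rst", b3), ("psh", b4), ("ack", b5), ("urg", true), ("ece", b7), ("cwr", b8)] := by
                  rw [if_pos (by decide)]; rw [show pvFlagMapA.getD 'U' "" = "urg" from by decide]; exact hins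
                rw [hstep, ih]
                simp
              ·
                by_cases hE : c = 'E'
                · subst hE
                  have hins : (PySem.Dict.mk [("fin", b1), ("syn", b2), ("rst", b3), ("psh", b4), ("ack", b5), ("urg", b6), ("ece", b7), ("cwr", b8)]).insert "ece" true = PySem.Dict.mk [("fin", b1), ("syn", b2), ("rst", b3), ("psh", b4), ("ack", b5), ("urg", b6), ("ece", true), ("cwr", b8)] := by
                    apply PySem.Dict.ext; simp [PySem.Dict.items_insert]
                  rw [List.foldl_cons]
                  have hstep : (if pvFlagMapA.contains 'E' = true then (PySem.Dict.mk [("fin", b1), ("syn", b2), ("rst", b3), ("psh", b4), ("ack", b5), ("urg", b6), ("ece", b7), ("cwr", b8)]).insert (pvFlagMapA.getD 'E' "") true else PySem.Dict.mk [("fin", b1), ("syn", b2), ("rst", b3), ("psh", b4), ("ack", b5), ("urg", b6), ("ece", b7), ("cwr", b8)]) = PySem.Dict.mk [("fin", b1), ("syn", b2), ("rst", b3), ("psh", b4), ("ack", b5), ("urg", b6), ("ece", true), ("cwr", b8)] := by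
                    rw [if_pos (by decide)]; rw [show pvFlagMapA.getD 'E' "" = "ece" from by decide]; exact hins
                  rw [hstep, ih]
                  simp
                ·
                  by_cases hC : c = 'C'
                  · subst hC
                    have hins : (PySem.Dict.mk [("fin", b1), ("syn", b2), ("rst", b3), ("psh", b4), ("ack", b5), ("urg", b6), ("ece", b7), ("cwr", b8)]).insert "cwr" true = PySem.Dict.mk [("fin", b1), ("syn", b2), ("rst", b3), ("psh", b4), ("ack", b5), ("urg", b6), ("ece", b7), ("cwr", true)] := by
                      apply PySem.Dict.ext; simp [PySem.Dict.items_insert]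
                    rw [List.foldl_cons]
                    have hstep : (if pvFlagMapA.contains 'C' = true then (PySem.Dict.mk [("fin", b1), ("syn", b2), ("rst", b3), ("psh", b4), ("ack", b5), ("urg", b6), ("ece", b7), ("cwr", b8)]).insert (pvFlagMapA.getD 'C' "") true else PySem.Dict.mk [("fin", b1), ("syn", b2), ("rst", b3), ("psh", b4), ("ack", b5), ("urg", b6), ("ece", b7), ("cwr", b8)]) = PySem.Dict.mk [("fin", b1), ("syn", b2), ("rst", b3), ("psh", b4), ("ack", b5), ("urg", b6), ("ece", b7), ("cwr", true)] := by
                      rw [if_pos (by decide)]; rw [show pvFlagMapA.getD 'C' "" = "cwr" from by decide]; exact hins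
                    rw [hstep, ih]
                    simp
                  ·
                    have hnc : pvFlagMapA.contains c = false := by
                      rw [show pvFlagMapA = PySem.Dict.mk [('F', "fin"), ('S', "syn"), ('R', "rst"), ('P', "psh"), ('A', "ack"), ('U', "urg"), ('E', "ece"), ('C', "cwr")] from by decide]
                      simp [hF, hS, hR, hP, hA, hU, hE, hC, Ne.symm]
                    rw [List.foldl_cons, if_neg (by simp [hnc]), ih]
                    simp [hF, hS, hR, hP, hA, hU, hE, hC, Ne.symm]

-- ===== VERDICT (by name: the statement is the Claim_ definition above) =====
theorem parse_packet_flags_spec : Claim_equal_parse_packet_flags := by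
  intro s _
  unfold Spec_parse_packet_flags parse_packet_flags parse_packet_flags_alt
  have h0 : pvFlagMapA.values.foldl (fun d name => d.insert name false) PySem.Dict.empty
      = PySem.Dict.mk [("fin", false), ("syn", false), ("rst", false), ("psh", false),
                       ("ack", false), ("urg", false), ("ece", false), ("cwr", false)] := by
    decide
  simp only [h0, pvLoopA_inv, Bool.false_or]
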